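-- pv_equiv track=rewrite | github.com/maiziezhoulab/Aquila_stLFR2 | bin/BAM2FASTQ_By_Chromosome_old.py | split_chromosome
-- ===== SOURCE A (Python) =====
-- def split_chromosome(chrom_length, num_threads):
--     """
--     Splits a chromosome into equal blocks based on its length and the number of threads.
--
--     Args:
--         chrom_length (int): Length of the chromosome.
--         num_threads (int): Number of threads (blocks) to divide the chromosome into.
--
--     Returns:
--         list of tuples: List of (start, end) positions for each block.
--     """
--     block_size = chrom_length // num_threads
--     blocks = []
--
--     for i in range(num_threads):
--         start = i * block_size
--         end = start + block_size - 1 if i < num_threads - 1 else chrom_length - 1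
--         blocks.append((start, end))
--
--     return blocks
-- ===== SOURCE B (Python) =====
-- def split_chromosome(chrom_length, num_threads):
--     """Build the blocks back-to-front with running start/end pointers, then reverse.
--
--     The last block is emitted first with end = chrom_length - 1; each earlier
--     block is derived from the one after it (its end is the next block's start
--     minus one), so no per-iteration last-block conditional and no per-element
--     multiplication are needed.
--     """
--     block_size = chrom_length // num_threads
--     blocks = []
--     start = (num_threads - 1) * block_size
--     end = chrom_length - 1
--     for _ in range(num_threads):
--         blocks.append((start, end))
--         end = start - 1
--         start -= block_size
--     blocks.reverse()
--     return blocks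
-- ===== Notes on version B (the rewrite author's own statement) =====
-- stated objective: alternative
-- what changed: B builds the blocks back-to-front with running start/end pointers (each block's end derived from the successor's start) and reverses at the end, removing A's per-iteration last-block conditional and per-element multiplication.
import Mathlib
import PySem

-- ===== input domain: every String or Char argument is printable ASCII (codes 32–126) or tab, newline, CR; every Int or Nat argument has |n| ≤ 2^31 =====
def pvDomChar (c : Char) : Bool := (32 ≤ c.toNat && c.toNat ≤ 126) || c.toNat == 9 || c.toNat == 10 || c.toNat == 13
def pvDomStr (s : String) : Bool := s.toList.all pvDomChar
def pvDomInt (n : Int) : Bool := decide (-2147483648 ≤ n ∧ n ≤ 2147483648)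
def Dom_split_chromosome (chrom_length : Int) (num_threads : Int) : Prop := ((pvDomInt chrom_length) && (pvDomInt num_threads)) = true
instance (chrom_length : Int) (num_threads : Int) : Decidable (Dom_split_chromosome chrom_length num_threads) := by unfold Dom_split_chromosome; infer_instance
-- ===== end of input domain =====

-- B builds the blocks back-to-front with running start/end pointers and reverses at the
-- end (objective: alternative); equal wherever A returns (num_threads ≠ 0).

-- ===== PORT A =====
def split_chromosome (chrom_length : Int) (num_threads : Int) : List (Int × Int) :=
  let block_size := PySem.Int.floordiv chrom_length num_threads
  (PySem.List.pyRange 0 num_threads 1).foldl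
    (fun blocks i =>
      let start := i * block_size
      let «end» := if i < num_threads - 1 then start + block_size - 1 else chrom_length - 1
      blocks ++ [(start, «end»)]) []

-- ===== PORT B =====
def split_chromosome_alt (chrom_length : Int) (num_threads : Int) : List (Int × Int) :=
  let block_size := PySem.Int.floordiv chrom_length num_threads
  let st := (PySem.List.pyRange 0 num_threads 1).foldl
    (fun (st : Int × Int × List (Int × Int)) _ =>
      let start := st.1
      let «end» := st.2.1
      let blocks := st.2.2
      (start - block_size, start - 1, blocks ++ [(start, «end»)]))
    ((num_threads - 1) * block_size, chrom_length - 1, [])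
  st.2.2.reverse

-- ===== PRECONDITION & SPEC =====
-- Pre_ excludes exactly num_threads = 0, where Python A raises ZeroDivisionError.
def Pre_split_chromosome (chrom_length : Int) (num_threads : Int) : Prop := num_threads ≠ 0
instance (chrom_length : Int) (num_threads : Int) : Decidable (Pre_split_chromosome chrom_length num_threads) := by unfold Pre_split_chromosome; infer_instance
def pvWitness_split_chromosome : Int × Int := (10, 3)

def Spec_split_chromosome (chrom_length : Int) (num_threads : Int) (out : List (Int × Int)) : Prop := out = split_chromosome_alt chrom_length num_threads
instance (chrom_length : Int) (num_threads : Int) (out : List (Int × Int)) : Decidable (Spec_split_chromosome chrom_length num_threads out) := by unfold Spec_split_chromosome; infer_instance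

-- ===== CLAIM (what is proved, stated in full; the proofs are below) =====
def Claim_equal_split_chromosome : Prop := ∀ (chrom_length : Int) (num_threads : Int), Dom_split_chromosome chrom_length num_threads → Pre_split_chromosome chrom_length num_threads → Spec_split_chromosome chrom_length num_threads (split_chromosome chrom_length num_threads)

-- ===== LEMMAS AND PROOFS =====

-- Characterisation of B's fold: the accumulated block list, for any driver list,
-- as an indexed map over List.range of its length.
theorem alt_fold_char (bs : Int) : ∀ (l : List Int) (s e : Int) (acc : List (Int × Int)),
    (l.foldl
      (fun (st : Int × Int × List (Int × Int)) _ =>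
        (st.1 - bs, st.1 - 1, st.2.2 ++ [(st.1, st.2.1)]))
      (s, e, acc)).2.2
    = acc ++ (List.range l.length).map
        (fun (j : Nat) => (s - (j : Int) * bs, if j = 0 then e else s - ((j : Int) - 1) * bs - 1)) := by
  intro l
  induction l with
  | nil => simp
  | cons a l ih =>
    intro s e acc
    simp only [List.foldl_cons, List.length_cons]
    rw [ih]
    rw [List.range_succ_eq_map, List.map_cons, List.map_map]
    simp only [List.append_assoc, List.singleton_append]
    congr 1
    congr 1
    · norm_num
    · apply List.map_congr_left
      intro j hj
      simp only [Function.comp_apply]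
      refine Prod.ext ?_ ?_
      · push_cast; ring
      · simp only [Nat.succ_ne_zero, if_false]
        by_cases hj0 : j = 0
        · subst hj0; simp
        · rw [if_neg hj0]
          push_cast [Nat.cast_pred (Nat.pos_of_ne_zero hj0)]
          ring

-- ===== VERDICT (by name: the statement is the Claim_ definition above) =====
theorem split_chromosome_spec : Claim_equal_split_chromosome := by
  intro L n _ hn
  unfold Spec_split_chromosome split_chromosome split_chromosome_alt
  rw [PySem.List.foldl_append_singleton_eq_map]
  simp only [List.nil_append]
  set bs := PySem.Int.floordiv L n with hbs
  rw [alt_fold_char bs (PySem.List.pyRange 0 n 1) ((n - 1) * bs) (L - 1) []]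
  simp only [List.nil_append, PySem.List.length_pyRange_one]
  set m : Nat := (n - 0).toNat with hm
  apply List.ext_getElem
  · simp [PySem.List.length_pyRange_one, hm]
  · intro i h1 h2
    simp only [List.getElem_map, List.getElem_reverse, List.length_map, List.length_range,
      List.getElem_range, PySem.List.getElem_pyRange_one, Prod.mk.injEq]
    have hlen : (PySem.List.pyRange 0 n 1).length = m := by
      simp [PySem.List.length_pyRange_one, hm]
    have hi : i < m := by
      simpa [hlen] using h1
    have hmn : (m : Int) = n := by omega
    have hcast : ((m - 1 - i : Nat) : Int) = n - 1 - i := by omega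
    constructor
    · rw [hcast]; ring
    · by_cases hlast : m - 1 - i = 0
      · have : ¬ ((0 : Int) + i < n - 1) := by omega
        rw [if_pos hlast, if_neg this]
      · have hlt : (0 : Int) + i < n - 1 := by omega
        rw [if_neg hlast, if_pos hlt]
        have : ((m - 1 - i : Nat) : Int) - 1 = n - 2 - i := by omega
        rw [this]; ring
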